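-- pv_equiv track=rewrite | github.com/NeuralStorm/Behavioral-Control-Programs | classifiers/behavioral_classifiers/eucl_classifier.py | group_trials
-- ===== SOURCE A (Python) =====
-- def group_trials(data):
--     trial_events = None
--     for x in data:
--         if x.get('name') == 'trial_start':
--             if trial_events:
--                 yield trial_events
--             trial_events = []
--         if trial_events is not None:
--             trial_events.append(x)
--
--     if trial_events:
--         yield trial_events
-- ===== SOURCE B (Python) =====
-- def group_trials(data):
--     xs = list(data)
--     starts = [i for i, x in enumerate(xs) if x.get('name') == 'trial_start']
--     for a, b in zip(starts, starts[1:] + [len(xs)]):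
--         yield xs[a:b]
-- ===== Notes on version B (the rewrite author's own statement) =====
-- stated objective: alternative
-- what changed: B replaces A's stateful one-pass accumulator (current-trial buffer mutated and flushed on each marker) by an index-based decomposition: it first collects the positions of all 'trial_start' markers, then yields the slice between each consecutive pair of start indices (the last paired with len(data)).
import Mathlib
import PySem

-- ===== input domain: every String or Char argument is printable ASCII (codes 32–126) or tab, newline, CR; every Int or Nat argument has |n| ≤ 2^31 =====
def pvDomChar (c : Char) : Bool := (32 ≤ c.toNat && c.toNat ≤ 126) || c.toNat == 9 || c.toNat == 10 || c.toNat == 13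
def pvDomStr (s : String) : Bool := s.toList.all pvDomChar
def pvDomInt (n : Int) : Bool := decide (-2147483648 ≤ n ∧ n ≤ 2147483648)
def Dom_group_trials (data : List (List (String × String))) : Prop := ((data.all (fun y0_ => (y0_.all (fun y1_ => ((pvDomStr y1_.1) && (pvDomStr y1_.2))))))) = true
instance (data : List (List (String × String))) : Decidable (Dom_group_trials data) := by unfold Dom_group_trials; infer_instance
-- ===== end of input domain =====

-- B groups the event stream by slicing between precomputed 'trial_start' indices instead of A's mutated running buffer; same cost, different decomposition (objective: alternative).

-- shared helper: Python's x.get('name') == 'trial_start' on the association-list dict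
def pvIsStart (x : List (String × String)) : Bool :=
  (PySem.Dict.mk x).get? "name" == some "trial_start"

-- ===== PORT A =====
-- Python truthiness of trial_events (None or a list)
def pvTruthyA (o : Option (List (List (String × String)))) : Bool :=
  match o with
  | some l => !l.isEmpty
  | none => false

-- loop body of A: state = (trial_events : Option list, yielded output so far)
def pvStepA (s : Option (List (List (String × String))) × List (List (List (String × String))))
    (x : List (String × String)) :
    Option (List (List (String × String))) × List (List (List (String × String))) :=
  let s1 := if pvIsStart x then
      ((some [] : Option (List (List (String × String)))),
        if pvTruthyA s.1 then s.2 ++ [s.1.getD []] else s.2)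
    else s
  match s1.1 with
  | some te => (some (te ++ [x]), s1.2)
  | none => (none, s1.2)

def group_trials (data : List (List (String × String))) : List (List (List (String × String))) :=
  let s := data.foldl pvStepA (none, [])
  if pvTruthyA s.1 then s.2 ++ [s.1.getD []] else s.2

-- ===== PORT B =====
def group_trials_alt (data : List (List (String × String))) : List (List (List (String × String))) :=
  let starts : List Int :=
    (PySem.List.enumerate data 0).filterMap
      (fun p => if pvIsStart p.2 then some p.1 else none)
  ((starts.zip (PySem.List.slice starts (some 1) none ++ [(data.length : Int)])).map
    (fun p => PySem.List.slice data (some p.1) (some p.2)))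

-- ===== PRECONDITION & SPEC =====
def Spec_group_trials (data : List (List (String × String))) (out : List (List (List (String × String)))) : Prop := out = group_trials_alt data
instance (data : List (List (String × String))) (out : List (List (List (String × String)))) : Decidable (Spec_group_trials data out) := by unfold Spec_group_trials; infer_instance

-- ===== CLAIM (what is proved, stated in full; the proofs are below) =====
def Claim_equal_group_trials : Prop := ∀ (data : List (List (String × String))), Dom_group_trials data → Spec_group_trials data (group_trials data)

-- ===== LEMMAS AND PROOFS =====

-- reference form: split the stream at 'trial_start' markers
def pvSplit : List (List (String × String)) → List (List (List (String × String)))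
  | [] => []
  | x :: xs =>
    if pvIsStart x then
      (x :: xs.takeWhile (fun y => !pvIsStart y)) :: pvSplit (xs.dropWhile (fun y => !pvIsStart y))
    else pvSplit xs
termination_by l => l.length
decreasing_by
  · exact Nat.lt_succ_of_le (List.length_dropWhile_le _ _)
  · exact Nat.lt_succ_of_le (Nat.le_refl _)

-- natural-number start indices, structurally
def pvSN : List (List (String × String)) → List Nat
  | [] => []
  | x :: xs => if pvIsStart x then 0 :: (pvSN xs).map (· + 1) else (pvSN xs).map (· + 1)

-- ---- A side ----

theorem pvA_go (rest : List (List (String × String)))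
    (cur : List (List (String × String))) (out : List (List (List (String × String))))
    (hcur : cur ≠ []) :
    (let s := rest.foldl pvStepA (some cur, out)
     if pvTruthyA s.1 then s.2 ++ [s.1.getD []] else s.2) =
    out ++ (cur ++ rest.takeWhile (fun y => !pvIsStart y)) ::
      pvSplit (rest.dropWhile (fun y => !pvIsStart y)) := by
  induction rest generalizing cur out with
  | nil =>
    simp [pvTruthyA, hcur, pvSplit]
  | cons y ys ih =>
    by_cases hy : pvIsStart y
    · have hstep : pvStepA (some cur, out) y = (some [y], out ++ [cur]) := by
        simp [pvStepA, hy, pvTruthyA, hcur]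
      rw [show ((y :: ys).foldl pvStepA (some cur, out)) = ys.foldl pvStepA (some [y], out ++ [cur]) by
        rw [List.foldl_cons, hstep]]
      rw [ih [y] (out ++ [cur]) (by simp)]
      rw [List.takeWhile_cons_of_neg (by simp [hy]), List.dropWhile_cons_of_neg (by simp [hy])]
      simp [pvSplit, hy]
    · have hstep : pvStepA (some cur, out) y = (some (cur ++ [y]), out) := by
        simp [pvStepA, hy]
      rw [show ((y :: ys).foldl pvStepA (some cur, out)) = ys.foldl pvStepA (some (cur ++ [y]), out) by
        rw [List.foldl_cons, hstep]]
      rw [ih (cur ++ [y]) out (by simp)]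
      rw [List.takeWhile_cons_of_pos (by simp [hy]), List.dropWhile_cons_of_pos (by simp [hy])]
      simp

theorem pvA_none (data : List (List (String × String))) (out : List (List (List (String × String)))) :
    (let s := data.foldl pvStepA (none, out)
     if pvTruthyA s.1 then s.2 ++ [s.1.getD []] else s.2) = out ++ pvSplit data := by
  induction data generalizing out with
  | nil => simp [pvTruthyA, pvSplit]
  | cons x xs ih =>
    by_cases hx : pvIsStart x
    · have hstep : pvStepA (none, out) x = (some [x], out) := by
        simp [pvStepA, hx, pvTruthyA]
      rw [show ((x :: xs).foldl pvStepA (none, out)) = xs.foldl pvStepA (some [x], out) by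
        rw [List.foldl_cons, hstep]]
      rw [pvA_go xs [x] out (by simp)]
      simp [pvSplit, hx]
    · have hstep : pvStepA (none, out) x = (none, out) := by
        simp [pvStepA, hx]
      rw [show ((x :: xs).foldl pvStepA (none, out)) = xs.foldl pvStepA (none, out) by
        rw [List.foldl_cons, hstep]]
      rw [ih out]
      simp [pvSplit, hx]

theorem pvA_eq_split (data : List (List (String × String))) :
    group_trials data = pvSplit data := by
  have := pvA_none data []
  simpa [group_trials] using this

-- ---- B side ----

theorem pvSN_nonneg_rec (xs : List (List (String × String))) :
    ((PySem.List.enumerate xs 0).filterMap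
      (fun p => if pvIsStart p.2 then some p.1 else none)) = (pvSN xs).map (fun k => ((k : Nat) : Int)) := by
  suffices h : ∀ (s : Nat), ((PySem.List.enumerate xs ((s : Nat) : Int)).filterMap
      (fun p => if pvIsStart p.2 then some p.1 else none)) =
      (pvSN xs).map (fun k => (((s + k : Nat)) : Int)) by
    simpa using h 0
  induction xs with
  | nil => intro s; simp [PySem.List.enumerate_nil, pvSN]
  | cons x xs ih =>
    intro s
    rw [PySem.List.enumerate_cons]
    have h1 : ((s : Int) + 1) = (((s + 1 : Nat)) : Int) := by push_cast; ring
    by_cases hx : pvIsStart x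
    · simp only [List.filterMap_cons, hx, if_pos, pvSN, h1, ih (s + 1),
        List.map_cons, List.map_map]
      refine congrArg₂ List.cons (by push_cast; ring) ?_
      apply List.map_congr_left
      intro a _
      simp only [Function.comp_apply]
      push_cast
      ring
    · simp only [List.filterMap_cons, hx, Bool.false_eq_true, if_false, pvSN, h1, ih (s + 1),
        List.map_map]
      apply List.map_congr_left
      intro a _
      simp only [Function.comp_apply]
      push_cast
      ring

-- B as a pure Nat slice computation
def pvG (data : List (List (String × String))) : List (List (List (String × String))) :=
  let N := pvSN data
  (N.zip (N.drop 1 ++ [data.length])).map (fun p => (data.drop p.1).take (p.2 - p.1))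

theorem pvB_eq_G (data : List (List (String × String))) :
    group_trials_alt data = pvG data := by
  simp only [group_trials_alt, pvG]
  rw [pvSN_nonneg_rec data]
  rw [PySem.List.slice_from_one]
  have htail : ((pvSN data).map (fun k => ((k : Nat) : Int))).tail ++ [((data.length : Nat) : Int)] =
      ((pvSN data).drop 1 ++ [data.length]).map (fun k => ((k : Nat) : Int)) := by
    simp [List.map_tail]
  rw [htail, List.zip_map]
  rw [List.map_map]
  apply List.map_congr_left
  intro p _
  simp only [Function.comp_apply, Prod.map]
  rw [PySem.List.slice_natCast]

theorem pvSN_nil_takeWhile (xs : List (List (String × String))) (h : pvSN xs = []) :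
    xs.takeWhile (fun y => !pvIsStart y) = xs := by
  induction xs with
  | nil => simp
  | cons x xs ih =>
    by_cases hx : pvIsStart x
    · simp [pvSN, hx] at h
    · simp only [pvSN, hx, Bool.false_eq_true, if_false, List.map_eq_nil_iff] at h
      simp [hx, ih h]

theorem pvSN_head_takeWhile (xs : List (List (String × String))) (k : Nat) (K : List Nat)
    (h : pvSN xs = k :: K) :
    k = (xs.takeWhile (fun y => !pvIsStart y)).length := by
  induction xs generalizing k K with
  | nil => simp [pvSN] at h
  | cons x xs ih =>
    by_cases hx : pvIsStart x
    · simp only [pvSN, hx, if_pos] at h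
      injection h with h1 h2
      rw [List.takeWhile_cons_of_neg (by simp [hx])]
      simp [← h1]
    · simp only [pvSN, hx, Bool.false_eq_true, if_false] at h
      cases hsn : pvSN xs with
      | nil => rw [hsn] at h; simp at h
      | cons k' K' =>
        rw [hsn, List.map_cons] at h
        injection h with h1 h2
        rw [List.takeWhile_cons_of_pos (by simp [hx])]
        simp [← h1, ih k' K' hsn]

theorem pvSplit_dropWhile (xs : List (List (String × String))) :
    pvSplit (xs.dropWhile (fun y => !pvIsStart y)) = pvSplit xs := by
  induction xs with
  | nil => simp
  | cons x xs ih =>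
    by_cases hx : pvIsStart x
    · simp [hx]
    · rw [List.dropWhile_cons]
      simp only [hx, Bool.not_false, if_pos, ih]
      simp [pvSplit, hx]

theorem pvTakeWhile_take (xs : List (List (String × String))) :
    xs.take (xs.takeWhile (fun y => !pvIsStart y)).length = xs.takeWhile (fun y => !pvIsStart y) :=
  ((List.prefix_iff_eq_take).1 (List.takeWhile_prefix _)).symm

-- the shifted pair list computes the same groups on the tail
theorem pvG_shift (P : List (Nat × Nat)) (x : List (String × String))
    (xs : List (List (String × String))) :
    (P.map (Prod.map (· + 1) (· + 1))).map
      (fun p => ((x :: xs).drop p.1).take (p.2 - p.1)) =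
    P.map (fun p => (xs.drop p.1).take (p.2 - p.1)) := by
  rw [List.map_map]
  apply List.map_congr_left
  intro p _
  simp [Prod.map, Nat.add_sub_add_right]

theorem pvG_eq_split (data : List (List (String × String))) :
    pvG data = pvSplit data := by
  induction data with
  | nil => simp [pvG, pvSN, pvSplit]
  | cons x xs ih =>
    by_cases hx : pvIsStart x
    · cases hsn : pvSN xs with
      | nil =>
        have htw := pvSN_nil_takeWhile xs hsn
        unfold pvG
        simp only [pvSN, hx, if_pos, hsn, List.map_nil, List.drop_succ_cons, List.drop_nil,
          List.nil_append, List.zip_cons_cons, List.zip_nil_right, List.map_cons, List.map_nil,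
          List.drop_zero, Nat.sub_zero, List.length_cons]
        rw [List.take_of_length_le (by simp)]
        simp only [pvSplit, hx, if_pos, htw]
        have hdw : xs.dropWhile (fun y => !pvIsStart y) = [] := by
          have := xs.takeWhile_append_dropWhile (p := fun y => !pvIsStart y)
          rw [htw] at this
          simpa using this.symm
        simp [hdw, pvSplit]
      | cons k K =>
        have hk := pvSN_head_takeWhile xs k K hsn
        unfold pvG
        simp only [pvSN, hx, if_pos, hsn, List.map_cons, List.drop_succ_cons, List.drop_zero]
        -- zip (0 :: (k+1) :: map) (((k+1) :: map) ++ [len+1])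
        rw [List.cons_append, List.zip_cons_cons, List.map_cons]
        have hpairs : (((k + 1) :: K.map (· + 1)).zip (K.map (· + 1) ++ [(x :: xs).length])) =
            ((k :: K).zip (K ++ [xs.length])).map (Prod.map (· + 1) (· + 1)) := by
          simp only [List.length_cons]
          have : K.map (· + 1) ++ [xs.length + 1] = (K ++ [xs.length]).map (· + 1) := by simp
          rw [this, show ((k + 1) :: K.map (· + 1)) = (k :: K).map (· + 1) from rfl, List.zip_map]
        rw [hpairs, pvG_shift]
        have htailG : ((k :: K).zip (K ++ [xs.length])).map (fun p => (xs.drop p.1).take (p.2 - p.1)) = pvG xs := by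
          unfold pvG
          simp [hsn]
        rw [htailG, ih]
        simp only [pvSplit, hx, if_pos, pvSplit_dropWhile]
        congr 1
        simp only [List.drop_zero, Nat.sub_zero, List.take_succ_cons]
        rw [hk, pvTakeWhile_take]
    · unfold pvG
      simp only [pvSN, hx, Bool.false_eq_true, if_false]
      have htail : ((pvSN xs).map (· + 1)).drop 1 ++ [(x :: xs).length] =
          ((pvSN xs).drop 1 ++ [xs.length]).map (· + 1) := by
        simp
      rw [htail, List.zip_map, pvG_shift]
      have : ((pvSN xs).zip ((pvSN xs).drop 1 ++ [xs.length])).map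
          (fun p => (xs.drop p.1).take (p.2 - p.1)) = pvG xs := rfl
      rw [this, ih]
      simp [pvSplit, hx]

-- ===== VERDICT (by name: the statement is the Claim_ definition above) =====
theorem group_trials_spec : Claim_equal_group_trials := by
  intro data _
  unfold Spec_group_trials
  rw [pvA_eq_split, pvB_eq_G, pvG_eq_split]
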